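-- pv_equiv track=rewrite | github.com/Tijndagamer/PGPost | pgpost/app.py | strip_signature
-- ===== SOURCE A (Python) =====
-- def strip_signature(post):
--     """Strip PGP signature data from post, only keep the user content itself."""
--
--     split_post = post.split('\n')
--     text = ""
--
--     i = 0
--     while i < len(split_post):
--         if i > 2:
--             if split_post[i] == "-----BEGIN PGP SIGNATURE-----":
--                 break
--             else:
--                 text += split_post[i] + '\n'
--                 i += 1
--         else:
--             i += 1
--     return text
-- ===== SOURCE B (Python) =====
-- def strip_signature(post):
--     """Strip PGP signature data from post, only keep the user content itself."""
--     lines = post.split('\n')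
--     try:
--         end = lines.index('-----BEGIN PGP SIGNATURE-----', 3)
--     except ValueError:
--         end = len(lines)
--     return ''.join(line + '\n' for line in lines[3:end])
-- ===== Notes on version B (the rewrite author's own statement) =====
-- stated objective: simpler
-- what changed: Replaces the interleaved index-while-loop that concatenates strings as it scans with a two-phase decomposition: first locate the signature boundary with list.index(marker, 3) (falling back to len), then join the slice lines[3:end] in one pass.
import Mathlib
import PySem

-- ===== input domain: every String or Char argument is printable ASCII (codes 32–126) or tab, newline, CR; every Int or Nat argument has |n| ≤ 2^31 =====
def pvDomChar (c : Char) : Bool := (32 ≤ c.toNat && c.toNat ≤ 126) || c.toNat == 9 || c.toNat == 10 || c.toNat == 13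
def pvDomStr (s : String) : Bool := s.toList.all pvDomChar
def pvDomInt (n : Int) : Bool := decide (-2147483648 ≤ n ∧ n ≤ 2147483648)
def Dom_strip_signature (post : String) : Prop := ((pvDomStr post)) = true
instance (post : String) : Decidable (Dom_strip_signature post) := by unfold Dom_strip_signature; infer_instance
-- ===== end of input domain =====

-- B replaces A's interleaved scan-and-concatenate while loop with a two-phase
-- decomposition: find the signature boundary first, then join the slice (objective: simpler).

-- ===== PORT A =====
-- while-loop of A: index i over split_post, skipping i ≤ 2, breaking at the marker,
-- otherwise appending the line plus '\n' to the accumulator text.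
def stripLoopA (lines : List String) (i : Nat) (text : String) : String :=
  if i < lines.length then
    if i > 2 then
      if lines.getD i "" = "-----BEGIN PGP SIGNATURE-----" then text
      else stripLoopA lines (i + 1) (text ++ lines.getD i "" ++ "\n")
    else stripLoopA lines (i + 1) text
  else text
termination_by lines.length - i

def strip_signature (post : String) : String :=
  stripLoopA ((PySem.Str.split? post "\n").getD []) 0 ""

-- ===== PORT B =====
def strip_signature_alt (post : String) : String :=
  let lines := (PySem.Str.split? post "\n").getD []
  -- lines.index('-----BEGIN PGP SIGNATURE-----', 3) inside try/except ValueError: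
  -- exact as first match at index ≥ 3 (index? on the dropped prefix, shifted back), len on ValueError
  let endIdx : Nat :=
    match PySem.List.index? (lines.drop 3) "-----BEGIN PGP SIGNATURE-----" with
    | some k => 3 + k
    | none => lines.length
  PySem.Str.join "" ((PySem.List.slice lines (some ((3 : Nat) : Int)) (some ((endIdx : Nat) : Int))).map (· ++ "\n"))

-- ===== PRECONDITION & SPEC =====
def Spec_strip_signature (post : String) (out : String) : Prop := out = strip_signature_alt post
instance (post : String) (out : String) : Decidable (Spec_strip_signature post out) := by unfold Spec_strip_signature; infer_instance

-- ===== CLAIM (what is proved, stated in full; the proofs are below) =====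
def Claim_equal_strip_signature : Prop := ∀ (post : String), Dom_strip_signature post → Spec_strip_signature post (strip_signature post)

-- ===== LEMMAS AND PROOFS =====

-- the characters contributed by a suffix of lines: lines before the marker, each with '\n'
def chunk (rest : List String) : List Char :=
  ((rest.takeWhile (fun l => l ≠ "-----BEGIN PGP SIGNATURE-----")).map
    (fun l => l.toList ++ ['\n'])).flatten

theorem stripLoopA_low (lines : List String) (i : Nat) (t : String) (h : i ≤ 2) :
    stripLoopA lines i t = stripLoopA lines (i + 1) t := by
  rw [stripLoopA]
  by_cases h1 : i < lines.length
  · simp [h1, show ¬ i > 2 by omega]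
  · rw [if_neg h1, stripLoopA, if_neg (show ¬ (i + 1 < lines.length) by omega)]

theorem stripLoopA_high (rest : List String) :
    ∀ (lines : List String) (i : Nat) (t : String), lines.drop i = rest → 3 ≤ i →
      (stripLoopA lines i t).toList = t.toList ++ chunk rest := by
  induction rest with
  | nil =>
    intro lines i t hdrop hi
    have hlen : lines.length ≤ i := List.drop_eq_nil_iff.mp hdrop
    rw [stripLoopA]
    simp [Nat.not_lt.mpr hlen, chunk]
  | cons x xs ih =>
    intro lines i t hdrop hi
    have hlt : i < lines.length := by
      by_contra hc
      rw [List.drop_eq_nil_of_le (by omega)] at hdrop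
      exact List.cons_ne_nil x xs hdrop.symm
    have h0 : lines[i]? = some x := by
      have h := @List.getElem?_drop _ lines i 0
      rw [hdrop] at h
      simpa using h.symm
    have hget : lines.getD i "" = x := by
      rw [List.getD_eq_getElem?_getD, h0]; rfl
    have htail : lines.drop (i + 1) = xs := by
      rw [← List.tail_drop, hdrop]; rfl
    rw [stripLoopA]
    simp only [hlt, if_pos, show i > 2 by omega, if_pos, hget]
    by_cases hx : x = "-----BEGIN PGP SIGNATURE-----"
    · simp [hx, chunk]
    · rw [if_neg hx, ih lines (i + 1) _ htail (by omega)]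
      simp [chunk, hx]

theorem take_index_eq_takeWhile (rest : List String) :
    rest.take (match PySem.List.index? rest "-----BEGIN PGP SIGNATURE-----" with
               | some k => k
               | none => rest.length)
      = rest.takeWhile (fun l => l ≠ "-----BEGIN PGP SIGNATURE-----") := by
  induction rest with
  | nil => rfl
  | cons x xs ih =>
    by_cases hx : x = "-----BEGIN PGP SIGNATURE-----"
    · subst hx
      rw [PySem.List.index?_cons_self]
      simp
    · rw [PySem.List.index?_cons_of_ne xs hx]
      cases h : PySem.List.index? xs "-----BEGIN PGP SIGNATURE-----" with
      | some k =>
        simp only [h] at ih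
        simp only [Option.map_some]
        simp [hx, ih]
      | none =>
        simp only [h] at ih
        simp only [Option.map_none]
        simp [hx, ih]

theorem join_empty_flatten (parts : List (List Char)) :
    PySem.Chars.join [] parts = parts.flatten := by
  induction parts with
  | nil => rfl
  | cons x xs ih =>
    cases xs with
    | nil => rw [PySem.Chars.join_singleton]; simp
    | cons y ys => rw [PySem.Chars.join_cons_cons, ih]; simp

theorem alt_core (lines : List String) :
    (PySem.Str.join ""
      ((PySem.List.slice lines (some ((3 : Nat) : Int))
        (some (((match PySem.List.index? (lines.drop 3) "-----BEGIN PGP SIGNATURE-----" with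
                 | some k => 3 + k
                 | none => lines.length : Nat)) : Int))).map (· ++ "\n"))).toList
      = chunk (lines.drop 3) := by
  rw [PySem.List.slice_natCast]
  have htk : (lines.drop 3).take
      ((match PySem.List.index? (lines.drop 3) "-----BEGIN PGP SIGNATURE-----" with
        | some k => 3 + k
        | none => lines.length) - 3)
      = (lines.drop 3).takeWhile (fun l => l ≠ "-----BEGIN PGP SIGNATURE-----") := by
    rw [← take_index_eq_takeWhile]
    cases h : PySem.List.index? (lines.drop 3) "-----BEGIN PGP SIGNATURE-----" with
    | some k => simp only [Nat.add_sub_cancel_left]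
    | none =>
      rw [List.take_of_length_le (by simp), List.take_of_length_le (by simp)]
  rw [htk, PySem.Str.toList_join]
  simp only [show ("" : String).toList = [] from rfl]
  rw [join_empty_flatten]
  simp [chunk, Function.comp_def]

theorem alt_toList (post : String) :
    (strip_signature_alt post).toList
      = chunk (((PySem.Str.split? post "\n").getD []).drop 3) :=
  alt_core ((PySem.Str.split? post "\n").getD [])

-- ===== VERDICT (by name: the statement is the Claim_ definition above) =====
theorem strip_signature_spec : Claim_equal_strip_signature := by
  intro post _
  unfold Spec_strip_signature strip_signature
  apply String.toList_inj.mp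
  rw [alt_toList]
  rw [stripLoopA_low _ 0 _ (by omega), stripLoopA_low _ 1 _ (by omega),
      stripLoopA_low _ 2 _ (by omega)]
  rw [stripLoopA_high (((PySem.Str.split? post "\n").getD []).drop 3) _ 3 "" rfl (by omega)]
  rfl
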